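-- pv_equiv track=rewrite | github.com/jdcourcol/robot_server | main.py | is_safe_instruction
-- ===== SOURCE A (Python) =====
-- safety_mode = True  # Add safety checks before executing commands
--
-- def is_safe_instruction(instruction: str) -> bool:
--     """Check if instruction is safe to execute automatically"""
--     if not safety_mode:
--         return True
--
--     dangerous_commands = [
--         "destroy",
--         "break",
--         "damage",
--         "harm",
--         "hurt",
--         "delete",
--         "remove permanently",
--         "force",
--         "push hard",
--     ]
--
--     instruction_lower = instruction.lower()
--
--     for dangerous in dangerous_commands:
--         if dangerous in instruction_lower:
--             return False
--
--     return True
-- ===== SOURCE B (Python) =====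
-- safety_mode = True  # Add safety checks before executing commands
--
--
-- def is_safe_instruction(instruction: str) -> bool:
--     """Check if instruction is safe to execute automatically"""
--     if not safety_mode:
--         return True
--
--     dangerous_commands = [
--         "destroy",
--         "break",
--         "damage",
--         "harm",
--         "hurt",
--         "delete",
--         "remove permanently",
--         "force",
--         "push hard",
--     ]
--
--     s = instruction.lower()
--     # single left-to-right pass: at each position, test whether any
--     # dangerous phrase starts there
--     for i in range(len(s)):
--         for dangerous in dangerous_commands:
--             if s.startswith(dangerous, i):
--                 return False
--     return True
-- ===== Notes on version B (the rewrite author's own statement) =====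
-- stated objective: alternative
-- what changed: A scans the whole string once per dangerous phrase (phrase-major, one 'in' substring search each); B makes a single left-to-right position-major pass, testing at each position whether any dangerous phrase starts there.
import Mathlib
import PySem

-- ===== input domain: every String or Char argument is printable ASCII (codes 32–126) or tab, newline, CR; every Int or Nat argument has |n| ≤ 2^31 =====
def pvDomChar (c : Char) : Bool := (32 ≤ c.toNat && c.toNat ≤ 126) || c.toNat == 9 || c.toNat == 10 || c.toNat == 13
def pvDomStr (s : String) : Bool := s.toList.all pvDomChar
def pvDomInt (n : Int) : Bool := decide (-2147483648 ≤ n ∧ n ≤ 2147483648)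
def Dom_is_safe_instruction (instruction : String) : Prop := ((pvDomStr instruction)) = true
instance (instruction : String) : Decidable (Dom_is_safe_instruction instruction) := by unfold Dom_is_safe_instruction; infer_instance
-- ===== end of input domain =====

-- B replaces A's phrase-major loop (one full substring scan per phrase) by a single
-- left-to-right position-major pass testing each position for any phrase prefix (alternative).

def safety_mode : Bool := true

-- ===== PORT A =====
def dangerous_commands : List String :=
  ["destroy", "break", "damage", "harm", "hurt", "delete",
   "remove permanently", "force", "push hard"]

def pvALoop (instruction_lower : String) : List String → Bool
  | [] => true
  | d :: rest =>
      if PySem.Str.isIn d instruction_lower then false else pvALoop instruction_lower rest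

def is_safe_instruction (instruction : String) : Bool :=
  if !safety_mode then true
  else pvALoop (PySem.Str.lower instruction) dangerous_commands

-- ===== PORT B =====
-- the `for i in range(len(s))` scan of Source B, as structural recursion on the tails of s
def pvBScan (s : List Char) : Bool :=
  match s with
  | [] => false
  | _ :: t =>
      dangerous_commands.any (fun d => PySem.Chars.startswith s d.toList) || pvBScan t

def is_safe_instruction_alt (instruction : String) : Bool :=
  if !safety_mode then true
  else !pvBScan (PySem.Str.lower instruction).toList

-- ===== PRECONDITION & SPEC =====
def Spec_is_safe_instruction (instruction : String) (out : Bool) : Prop := out = is_safe_instruction_alt instruction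
instance (instruction : String) (out : Bool) : Decidable (Spec_is_safe_instruction instruction out) := by unfold Spec_is_safe_instruction; infer_instance

-- ===== CLAIM (what is proved, stated in full; the proofs are below) =====
def Claim_equal_is_safe_instruction : Prop := ∀ (instruction : String), Dom_is_safe_instruction instruction → Spec_is_safe_instruction instruction (is_safe_instruction instruction)

-- ===== LEMMAS AND PROOFS =====

theorem pvAny_or {α : Type} (l : List α) (f g : α → Bool) :
    (l.any fun x => f x || g x) = (l.any f || l.any g) := by
  induction l with
  | nil => simp
  | cons h t ih => simp [ih, Bool.or_assoc, Bool.or_left_comm]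

theorem pvIsIn_cons (d : List Char) (h : Char) (t : List Char) :
    PySem.Chars.isIn d (h :: t)
      = (PySem.Chars.startswith (h :: t) d || PySem.Chars.isIn d t) := by
  rw [Bool.eq_iff_iff]
  simp [PySem.Chars.isIn_iff_infix, PySem.Chars.startswith_iff, List.infix_cons_iff]

theorem pvBScan_eq (s : List Char) :
    pvBScan s = dangerous_commands.any (fun d => PySem.Chars.isIn d.toList s) := by
  induction s with
  | nil => decide
  | cons h t ih =>
      rw [pvBScan, ih]
      simp only [pvIsIn_cons, pvAny_or]

theorem pvALoop_eq (sl : String) (l : List String) :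
    pvALoop sl l = !(l.any fun d => PySem.Str.isIn d sl) := by
  induction l with
  | nil => rfl
  | cons d rest ih =>
      rw [pvALoop]
      by_cases hd : PySem.Str.isIn d sl = true <;> simp [ih]

-- ===== VERDICT (by name: the statement is the Claim_ definition above) =====
theorem is_safe_instruction_spec : Claim_equal_is_safe_instruction := by
  intro instruction _
  unfold Spec_is_safe_instruction is_safe_instruction is_safe_instruction_alt
  rw [pvALoop_eq, pvBScan_eq]
  simp [PySem.Str.isIn_eq]
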